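-- pv_equiv track=rewrite | github.com/Keerthanathonup/youtube-analyzer | services/youtube_service.py | _guess_content_type
-- ===== SOURCE A (Python) =====
-- def _guess_content_type(title: str, description: str) -> str:
--     """
--     Attempt to guess the content type based on title and description.
--
--     Args:
--         title: Video title
--         description: Video description
--
--     Returns:
--         Guessed content type
--     """
--     title_lower = title.lower()
--     desc_lower = description.lower()
--     combined = title_lower + " " + desc_lower
--
--     # Check for common content type indicators
--     if any(term in combined for term in ["tutorial", "how to", "guide", "learn", "course"]):
--         return "tutorial"
--     elif any(term in combined for term in ["review", "rating", "recommend", "worth it"]):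
--         return "review"
--     elif any(term in combined for term in ["vlog", "day in", "my life", "experience"]):
--         return "vlog"
--     elif any(term in combined for term in ["news", "update", "latest", "breaking"]):
--         return "news"
--     elif any(term in combined for term in ["explain", "explained", "understanding", "concept"]):
--         return "educational"
--     elif any(term in combined for term in ["gameplay", "playthrough", "gaming", "let's play"]):
--         return "gaming"
--     elif any(term in combined for term in ["unboxing", "haul", "new product"]):
--         return "unboxing"
--     elif any(term in combined for term in ["interview", "conversation", "discussion", "podcast"]):
--         return "interview"
--
--     # Default type
--     return "other"
-- ===== SOURCE B (Python) =====
-- # B: single flat pass over a keyword -> (rank, type) map, keeping the minimum-rank hit.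
-- _KEYWORDS = {
--     "tutorial": (0, "tutorial"), "how to": (0, "tutorial"), "guide": (0, "tutorial"),
--     "learn": (0, "tutorial"), "course": (0, "tutorial"),
--     "review": (1, "review"), "rating": (1, "review"), "recommend": (1, "review"),
--     "worth it": (1, "review"),
--     "vlog": (2, "vlog"), "day in": (2, "vlog"), "my life": (2, "vlog"),
--     "experience": (2, "vlog"),
--     "news": (3, "news"), "update": (3, "news"), "latest": (3, "news"),
--     "breaking": (3, "news"),
--     "explain": (4, "educational"), "explained": (4, "educational"),
--     "understanding": (4, "educational"), "concept": (4, "educational"),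
--     "gameplay": (5, "gaming"), "playthrough": (5, "gaming"), "gaming": (5, "gaming"),
--     "let's play": (5, "gaming"),
--     "unboxing": (6, "unboxing"), "haul": (6, "unboxing"), "new product": (6, "unboxing"),
--     "interview": (7, "interview"), "conversation": (7, "interview"),
--     "discussion": (7, "interview"), "podcast": (7, "interview"),
-- }
--
-- def _guess_content_type(title: str, description: str) -> str:
--     combined = title.lower() + " " + description.lower()
--     best = None
--     for kw, entry in _KEYWORDS.items():
--         if kw in combined and (best is None or entry[0] < best[0]):
--             best = entry
--     return best[1] if best is not None else "other"
-- ===== Notes on version B (the rewrite author's own statement) =====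
-- stated objective: alternative
-- what changed: Replaces the ordered if/elif chain of per-category any() checks (first match, early exit) by one flat pass over a keyword->(rank,type) map that keeps the minimum-rank matching keyword; the minimum rank is the first category in A's priority order.
import Mathlib
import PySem

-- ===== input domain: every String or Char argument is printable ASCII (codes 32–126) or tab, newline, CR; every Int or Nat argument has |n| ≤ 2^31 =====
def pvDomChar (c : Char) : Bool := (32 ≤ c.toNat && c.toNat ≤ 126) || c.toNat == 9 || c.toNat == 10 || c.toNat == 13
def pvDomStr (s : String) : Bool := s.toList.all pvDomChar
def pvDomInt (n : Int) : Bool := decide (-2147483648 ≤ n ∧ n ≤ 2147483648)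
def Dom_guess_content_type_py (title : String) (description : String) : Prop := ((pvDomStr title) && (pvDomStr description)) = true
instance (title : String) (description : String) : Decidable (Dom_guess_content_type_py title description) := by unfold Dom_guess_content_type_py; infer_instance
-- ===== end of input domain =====

-- B replaces A's ordered if/elif chain by one flat pass over a keyword->(rank,type) map keeping the minimum-rank hit (objective: alternative).


-- ===== PORT A =====
def guess_content_type_py (title : String) (description : String) : String :=
  let title_lower := PySem.Str.lower title
  let desc_lower := PySem.Str.lower description
  let combined := title_lower ++ " " ++ desc_lower
  if (["tutorial", "how to", "guide", "learn", "course"].any (fun term => PySem.Str.isIn term combined)) then "tutorial"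
  else if (["review", "rating", "recommend", "worth it"].any (fun term => PySem.Str.isIn term combined)) then "review"
  else if (["vlog", "day in", "my life", "experience"].any (fun term => PySem.Str.isIn term combined)) then "vlog"
  else if (["news", "update", "latest", "breaking"].any (fun term => PySem.Str.isIn term combined)) then "news"
  else if (["explain", "explained", "understanding", "concept"].any (fun term => PySem.Str.isIn term combined)) then "educational"
  else if (["gameplay", "playthrough", "gaming", "let's play"].any (fun term => PySem.Str.isIn term combined)) then "gaming"
  else if (["unboxing", "haul", "new product"].any (fun term => PySem.Str.isIn term combined)) then "unboxing"
  else if (["interview", "conversation", "discussion", "podcast"].any (fun term => PySem.Str.isIn term combined)) then "interview"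
  else "other"

-- ===== PORT B =====
-- B: flat keyword -> (rank, type) table (dict in insertion order), one pass keeping the minimum-rank hit.
def pvKeywords : List (String × (Nat × String)) :=
  [("tutorial", (0, "tutorial")), ("how to", (0, "tutorial")), ("guide", (0, "tutorial")),
   ("learn", (0, "tutorial")), ("course", (0, "tutorial")),
   ("review", (1, "review")), ("rating", (1, "review")), ("recommend", (1, "review")),
   ("worth it", (1, "review")),
   ("vlog", (2, "vlog")), ("day in", (2, "vlog")), ("my life", (2, "vlog")),
   ("experience", (2, "vlog")),
   ("news", (3, "news")), ("update", (3, "news")), ("latest", (3, "news")),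
   ("breaking", (3, "news")),
   ("explain", (4, "educational")), ("explained", (4, "educational")),
   ("understanding", (4, "educational")), ("concept", (4, "educational")),
   ("gameplay", (5, "gaming")), ("playthrough", (5, "gaming")), ("gaming", (5, "gaming")),
   ("let's play", (5, "gaming")),
   ("unboxing", (6, "unboxing")), ("haul", (6, "unboxing")), ("new product", (6, "unboxing")),
   ("interview", (7, "interview")), ("conversation", (7, "interview")),
   ("discussion", (7, "interview")), ("podcast", (7, "interview"))]

-- loop body: if kw in combined and (best is None or rank < best rank): best = entry
def pvStep (combined : String) (best : Option (Nat × String)) (kr : String × (Nat × String)) : Option (Nat × String) :=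
  if PySem.Str.isIn kr.1 combined then
    match best with
    | none => some kr.2
    | some b => if kr.2.1 < b.1 then some kr.2 else some b
  else best

def guess_content_type_py_alt (title : String) (description : String) : String :=
  let combined := PySem.Str.lower title ++ " " ++ PySem.Str.lower description
  match pvKeywords.foldl (pvStep combined) none with
  | some b => b.2
  | none => "other"

-- ===== PRECONDITION & SPEC =====
def Spec_guess_content_type_py (title : String) (description : String) (out : String) : Prop := out = guess_content_type_py_alt title description
instance (title : String) (description : String) (out : String) : Decidable (Spec_guess_content_type_py title description out) := by unfold Spec_guess_content_type_py; infer_instance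

-- ===== CLAIM (what is proved, stated in full; the proofs are below) =====
def Claim_equal_guess_content_type_py : Prop := ∀ (title : String) (description : String), Dom_guess_content_type_py title description → Spec_guess_content_type_py title description (guess_content_type_py title description)

-- ===== LEMMAS AND PROOFS =====

-- merging one (rank, type) entry into the accumulator
def pvMerge (best : Option (Nat × String)) (r : Nat × String) : Option (Nat × String) :=
  match best with
  | none => some r
  | some b => if r.1 < b.1 then some r else some b

lemma pvMerge_idem (best : Option (Nat × String)) (r : Nat × String) :
    pvMerge (pvMerge best r) r = pvMerge best r := by
  cases best with
  | none => simp [pvMerge]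
  | some b =>
      simp only [pvMerge]
      split_ifs <;> simp_all

-- folding the loop body over a constant-rank segment = one merge, guarded by the segment's any()
lemma pvSeg_fold (c : String) (r : Nat × String) (ks : List String) (best : Option (Nat × String)) :
    (ks.map (fun k => (k, r))).foldl (pvStep c) best =
      if ks.any (fun term => PySem.Str.isIn term c) then pvMerge best r else best := by
  induction ks generalizing best with
  | nil => simp
  | cons k ks ih =>
      have hstep : pvStep c best (k, r) = if PySem.Str.isIn k c then pvMerge best r else best := by
        cases best <;> simp only [pvStep, pvMerge]
      cases hk : PySem.Str.isIn k c <;>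
        cases ha : ks.any (fun term => PySem.Str.isIn term c) <;>
          simp only [List.map_cons, List.foldl_cons, List.any_cons, ih, hstep, hk, ha,
            Bool.true_or, Bool.false_or, if_true, Bool.false_eq_true,
            if_false, pvMerge_idem]

set_option maxHeartbeats 1000000 in
theorem guess_content_type_py_spec : Claim_equal_guess_content_type_py := by
  intro title description _
  unfold Spec_guess_content_type_py guess_content_type_py guess_content_type_py_alt
  set c := PySem.Str.lower title ++ " " ++ PySem.Str.lower description with hc
  have hkw : pvKeywords =
      (["tutorial", "how to", "guide", "learn", "course"].map (fun k => (k, ((0 : Nat), "tutorial")))) ++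
      (["review", "rating", "recommend", "worth it"].map (fun k => (k, ((1 : Nat), "review")))) ++
      (["vlog", "day in", "my life", "experience"].map (fun k => (k, ((2 : Nat), "vlog")))) ++
      (["news", "update", "latest", "breaking"].map (fun k => (k, ((3 : Nat), "news")))) ++
      (["explain", "explained", "understanding", "concept"].map (fun k => (k, ((4 : Nat), "educational")))) ++
      (["gameplay", "playthrough", "gaming", "let's play"].map (fun k => (k, ((5 : Nat), "gaming")))) ++
      (["unboxing", "haul", "new product"].map (fun k => (k, ((6 : Nat), "unboxing")))) ++
      (["interview", "conversation", "discussion", "podcast"].map (fun k => (k, ((7 : Nat), "interview")))) := rfl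
  rw [hkw]
  simp only [List.foldl_append, pvSeg_fold]
  generalize (["tutorial", "how to", "guide", "learn", "course"].any (fun term => PySem.Str.isIn term c)) = b1
  generalize (["review", "rating", "recommend", "worth it"].any (fun term => PySem.Str.isIn term c)) = b2
  generalize (["vlog", "day in", "my life", "experience"].any (fun term => PySem.Str.isIn term c)) = b3
  generalize (["news", "update", "latest", "breaking"].any (fun term => PySem.Str.isIn term c)) = b4
  generalize (["explain", "explained", "understanding", "concept"].any (fun term => PySem.Str.isIn term c)) = b5
  generalize (["gameplay", "playthrough", "gaming", "let's play"].any (fun term => PySem.Str.isIn term c)) = b6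
  generalize (["unboxing", "haul", "new product"].any (fun term => PySem.Str.isIn term c)) = b7
  generalize (["interview", "conversation", "discussion", "podcast"].any (fun term => PySem.Str.isIn term c)) = b8
  cases b1 <;> cases b2 <;> cases b3 <;> cases b4 <;> cases b5 <;> cases b6 <;> cases b7 <;> cases b8 <;> rfl
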